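-- pv_equiv track=rewrite | github.com/tsimkins/old.agsci.common | agsci/common/utilities/__init__.py | increaseHeadingLevel
-- ===== SOURCE A (Python) =====
-- def increaseHeadingLevel(text):
--     if '<h2' in text:
--         for i in reversed(range(1,6)):
--             from_header = "h%d" % i
--             to_header = "h%d" % (i+1)
--             text = text.replace("<%s" % from_header, "<%s" % to_header)
--             text = text.replace("</%s" % from_header, "</%s" % to_header)
--     return text
-- ===== SOURCE B (Python) =====
-- def increaseHeadingLevel(text):
--     # Single left-to-right scan instead of ten sequential str.replace passes.
--     if '<h2' not in text:
--         return text
--     out = []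
--     i = 0
--     n = len(text)
--     while i < n:
--         c = text[i]
--         if c == '<':
--             j = i + 1
--             if j < n and text[j] == '/':
--                 j += 1
--             if j + 1 < n and text[j] == 'h' and '1' <= text[j + 1] <= '5':
--                 out.append(text[i:j])
--                 out.append('h')
--                 out.append(chr(ord(text[j + 1]) + 1))
--                 i = j + 2
--                 continue
--         out.append(c)
--         i += 1
--     return ''.join(out)
-- ===== Notes on version B (the rewrite author's own statement) =====
-- stated objective: alternative
-- what changed: Replaced the ten sequential str.replace passes (each a full scan of the text) with a single left-to-right scan that increments the digit of each matched opening or closing h1-h5 tag in one pass, keeping the original guard on the presence of an h2 opening tag.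
import Mathlib
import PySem

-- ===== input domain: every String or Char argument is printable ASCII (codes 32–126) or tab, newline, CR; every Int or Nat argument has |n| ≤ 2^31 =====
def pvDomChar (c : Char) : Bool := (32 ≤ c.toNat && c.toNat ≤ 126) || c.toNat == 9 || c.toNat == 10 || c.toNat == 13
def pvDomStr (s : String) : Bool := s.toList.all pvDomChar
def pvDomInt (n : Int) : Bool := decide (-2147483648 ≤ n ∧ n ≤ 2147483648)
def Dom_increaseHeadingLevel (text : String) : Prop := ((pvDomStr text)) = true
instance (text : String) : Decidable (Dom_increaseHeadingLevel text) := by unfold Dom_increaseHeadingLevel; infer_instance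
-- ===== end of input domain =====

-- A performs ten sequential str.replace passes (reversed order); B does one left-to-right scan
-- incrementing the digit of each matched opening/closing h1-h5 tag, keeping A's guard. Same return value proved.


-- ===== PORT A =====
def increaseHeadingLevel (text : String) : String :=
  if PySem.Str.isIn "<h2" text then
    ((PySem.List.pyRange 1 6 1).reverse).foldl (fun t i =>
      let fromHeader : String := "h" ++ PySem.Int.toStr i
      let toHeader : String := "h" ++ PySem.Int.toStr (i + 1)
      let t1 := PySem.Str.replace t ("<" ++ fromHeader) ("<" ++ toHeader)
      PySem.Str.replace t1 ("</" ++ fromHeader) ("</" ++ toHeader)) text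
  else text

-- ===== PORT B =====
-- Source B appends chr(ord(d)+1) for a matched heading digit d
def incB (d : Char) : Char := Char.ofNat (d.toNat + 1)

-- single left-to-right scan of Source B's while loop (index arithmetic rendered as list pattern views)
def scanB : List Char → List Char
  | [] => []
  | c :: t =>
    if c = '<' then
      match t with
      | t1 :: t2 =>
        if t1 = '/' then
          match t2 with
          | t3 :: t4 =>
            if t3 = 'h' then
              match t4 with
              | d :: rest =>
                if '1' ≤ d ∧ d ≤ '5' then '<' :: '/' :: 'h' :: incB d :: scanB rest
                else '<' :: scanB (t1 :: t3 :: d :: rest)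
              | [] => '<' :: scanB [t1, t3]
            else '<' :: scanB (t1 :: t3 :: t4)
          | [] => '<' :: scanB [t1]
        else if t1 = 'h' then
          match t2 with
          | d :: rest =>
            if '1' ≤ d ∧ d ≤ '5' then '<' :: 'h' :: incB d :: scanB rest
            else '<' :: scanB (t1 :: d :: rest)
          | [] => '<' :: scanB [t1]
        else '<' :: scanB (t1 :: t2)
      | [] => ['<']
    else c :: scanB t
termination_by l => l.length
decreasing_by all_goals (simp <;> omega)

def increaseHeadingLevel_alt (text : String) : String :=
  if PySem.Str.isIn "<h2" text = false then text
  else String.ofList (scanB text.toList)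

-- ===== PRECONDITION & SPEC =====
def Spec_increaseHeadingLevel (text : String) (out : String) : Prop := out = increaseHeadingLevel_alt text
instance (text : String) (out : String) : Decidable (Spec_increaseHeadingLevel text out) := by unfold Spec_increaseHeadingLevel; infer_instance

-- ===== CLAIM (what is proved, stated in full; the proofs are below) =====
def Claim_equal_increaseHeadingLevel : Prop := ∀ (text : String), Dom_increaseHeadingLevel text → Spec_increaseHeadingLevel text (increaseHeadingLevel text)

-- ===== LEMMAS AND PROOFS =====

-- clean structural form of PySem.Chars.replace (for non-empty pattern)
def rep (old new : List Char) : List Char → List Char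
  | [] => []
  | c :: t =>
    if old.isPrefixOf (c :: t) then new ++ rep old new (t.drop (old.length - 1))
    else c :: rep old new t
termination_by l => l.length
decreasing_by all_goals simp

theorem go_eq (old new : List Char) (h : old ≠ []) :
    ∀ (fuel : Nat) (l acc : List Char), l.length ≤ fuel →
      PySem.Chars.replace.go old new fuel l acc = acc.reverse ++ rep old new l := by
  intro fuel
  induction fuel with
  | zero =>
    intro l acc hl
    have hnil : l = [] := by cases l <;> simp_all
    subst hnil
    rw [PySem.Chars.replace.go]
    simp [rep]
  | succ n IH =>
    intro l acc hl
    cases l with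
    | nil =>
      simp [PySem.Chars.replace.go, rep]
    | cons c t =>
      have h1 : 1 ≤ old.length := List.length_pos_iff.mpr h
      rw [PySem.Chars.replace.go]
      by_cases hp : old.isPrefixOf (c :: t)
      · have hdrop : List.drop old.length (c :: t) = t.drop (old.length - 1) := by
          cases old with
          | nil => exact absurd rfl h
          | cons o os => simp
        have hlen : (t.drop (old.length - 1)).length ≤ n := by
          simp at hl ⊢; omega
        simp only [hp, if_true, hdrop]
        rw [IH _ _ hlen, rep]
        simp [hp]
      · have hlen : t.length ≤ n := by simp at hl; omega
        simp only [hp, Bool.false_eq_true, if_false]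
        rw [IH _ _ hlen, rep]
        simp [hp]

theorem replace_eq (old new l : List Char) (h : old ≠ []) :
    PySem.Chars.replace l old new = rep old new l := by
  rw [PySem.Chars.replace]
  have : old.isEmpty = false := by cases old <;> simp_all
  rw [this]
  simp only [Bool.false_eq_true, if_false]
  exact go_eq old new h l.length l [] (le_refl _)

-- A's ten replace passes, as nested rep applications (innermost first: <h5, </h5, <h4, …, </h1)
def chainA (l : List Char) : List Char :=
  rep ['<','/','h','1'] ['<','/','h','2'] (rep ['<','h','1'] ['<','h','2']
  (rep ['<','/','h','2'] ['<','/','h','3'] (rep ['<','h','2'] ['<','h','3']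
  (rep ['<','/','h','3'] ['<','/','h','4'] (rep ['<','h','3'] ['<','h','4']
  (rep ['<','/','h','4'] ['<','/','h','5'] (rep ['<','h','4'] ['<','h','5']
  (rep ['<','/','h','5'] ['<','/','h','6'] (rep ['<','h','5'] ['<','h','6'] l)))))))))

theorem dig_enum {d : Char} (h1 : '1' ≤ d) (h5 : d ≤ '5') :
    d = '1' ∨ d = '2' ∨ d = '3' ∨ d = '4' ∨ d = '5' := by
  have mk : ∀ (c : Char), d.toNat = c.toNat → d = c := fun c hc =>
    Char.ext (UInt32.toNat_inj.mp hc)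
  have hv : 49 ≤ d.toNat ∧ d.toNat ≤ 53 := by
    constructor <;> simp [Char.le_def, UInt32.le_iff_toNat_le] at h1 h5 <;> omega
  have h : d.toNat = 49 ∨ d.toNat = 50 ∨ d.toNat = 51 ∨ d.toNat = 52 ∨ d.toNat = 53 := by omega
  rcases h with h|h|h|h|h
  · exact Or.inl (mk '1' h)
  · exact Or.inr (Or.inl (mk '2' h))
  · exact Or.inr (Or.inr (Or.inl (mk '3' h)))
  · exact Or.inr (Or.inr (Or.inr (Or.inl (mk '4' h))))
  · exact Or.inr (Or.inr (Or.inr (Or.inr (mk '5' h))))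

theorem not_dig {d : Char} (hd : ¬('1' ≤ d ∧ d ≤ '5')) :
    (¬'1' = d) ∧ (¬'2' = d) ∧ (¬'3' = d) ∧ (¬'4' = d) ∧ (¬'5' = d) := by
  refine ⟨?_, ?_, ?_, ?_, ?_⟩ <;> (rintro rfl; exact hd (by decide))

theorem rep_cons (old new : List Char) (c : Char) (t : List Char)
    (h : old.isPrefixOf (c :: t) = false) : rep old new (c :: t) = c :: rep old new t := by
  rw [rep]; simp [h]

theorem rep_match (old new : List Char) (c : Char) (t : List Char)
    (h : old.isPrefixOf (c :: t) = true) :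
    rep old new (c :: t) = new ++ rep old new (t.drop (old.length - 1)) := by
  rw [rep]; simp [h]

theorem head?_rep {X : List Char} {a b : Char} (old new : List Char)
    (hnew : new.head? = some a) (hX : X.head? = some a ∨ X.head? = some b) :
    (rep old new X).head? = some a ∨ (rep old new X).head? = some b := by
  cases X with
  | nil => rcases hX with h|h <;> simp_all
  | cons c t =>
    rw [rep]
    split
    · left
      cases new with
      | nil => simp at hnew
      | cons nh nt => simp at hnew ⊢; exact hnew
    · simpa using hX

theorem isP_false {X : List Char} {a b : Char} (p : Char) (ps : List Char)
    (hX : X.head? = some a ∨ X.head? = some b) (hpa : ¬ p = a) (hpb : ¬ p = b) :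
    (p :: ps).isPrefixOf X = false := by
  rcases hX with h|h <;> cases X <;> simp_all [List.isPrefixOf]

theorem incB_1 : incB '1' = '2' := rfl
theorem incB_2 : incB '2' = '3' := rfl
theorem incB_3 : incB '3' = '4' := rfl
theorem incB_4 : incB '4' = '5' := rfl
theorem incB_5 : incB '5' = '6' := rfl

theorem scanB_other (c : Char) (t : List Char) (hc : ¬ c = '<') :
    scanB (c :: t) = c :: scanB t := by
  rw [scanB.eq_def]; simp [hc]

theorem scanB_lt : scanB ['<'] = ['<'] := by rw [scanB.eq_def]; simp

theorem scanB_slash_nil : scanB ['<', '/'] = ['<', '/'] := by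
  rw [scanB.eq_def]; simp [scanB.eq_def]

theorem scanB_close_nil : scanB ['<', '/', 'h'] = ['<', '/', 'h'] := by
  rw [scanB.eq_def]; simp [scanB.eq_def]

theorem scanB_open_nil : scanB ['<', 'h'] = ['<', 'h'] := by
  rw [scanB.eq_def]; simp [scanB.eq_def]

theorem scanB_close_dig (d : Char) (rest : List Char) (hd : '1' ≤ d ∧ d ≤ '5') :
    scanB ('<' :: '/' :: 'h' :: d :: rest) = '<' :: '/' :: 'h' :: incB d :: scanB rest := by
  rw [scanB.eq_def]; simp [hd]

theorem scanB_close_nondig (d : Char) (rest : List Char) (hd : ¬('1' ≤ d ∧ d ≤ '5')) :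
    scanB ('<' :: '/' :: 'h' :: d :: rest) = '<' :: '/' :: 'h' :: scanB (d :: rest) := by
  rw [scanB.eq_def]
  simp [hd, scanB_other]

theorem scanB_open_dig (d : Char) (rest : List Char) (hd : '1' ≤ d ∧ d ≤ '5') :
    scanB ('<' :: 'h' :: d :: rest) = '<' :: 'h' :: incB d :: scanB rest := by
  rw [scanB.eq_def]; simp [hd]

theorem scanB_open_nondig (d : Char) (rest : List Char) (hd : ¬('1' ≤ d ∧ d ≤ '5')) :
    scanB ('<' :: 'h' :: d :: rest) = '<' :: 'h' :: scanB (d :: rest) := by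
  rw [scanB.eq_def]
  simp [hd, scanB_other]

theorem scanB_slash_noth (t3 : Char) (t4 : List Char) (h3 : ¬ t3 = 'h') :
    scanB ('<' :: '/' :: t3 :: t4) = '<' :: '/' :: scanB (t3 :: t4) := by
  rw [scanB.eq_def]
  simp [h3, scanB_other]

theorem scanB_lt_other (t1 : Char) (t2 : List Char) (h1s : ¬ t1 = '/') (h1h : ¬ t1 = 'h') :
    scanB ('<' :: t1 :: t2) = '<' :: scanB (t1 :: t2) := by
  rw [scanB.eq_def]
  simp [h1s, h1h]

theorem main_eq : ∀ (n : Nat) (l : List Char), l.length ≤ n → chainA l = scanB l := by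
  intro n
  induction n with
  | zero =>
    intro l hl
    have hnil : l = [] := by cases l <;> simp_all
    subst hnil
    rw [scanB.eq_def]
    simp [chainA, rep]
  | succ n IH =>
    intro l hl
    rcases l with _ | ⟨c, t⟩
    · rw [scanB.eq_def]; simp [chainA, rep]
    by_cases hc : c = '<'
    case neg =>
      have ht : t.length ≤ n := by simp at hl ⊢; omega
      have IH' := IH t ht
      simp only [chainA] at IH'
      rw [scanB_other c t hc]
      simp [chainA, rep_cons, List.isPrefixOf, Ne.symm hc, IH']
    case pos =>
      subst hc
      rcases t with _ | ⟨t1, t2⟩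
      · rw [scanB_lt]; simp [chainA, rep]
      by_cases h1s : t1 = '/'
      · subst h1s
        rcases t2 with _ | ⟨t3, t4⟩
        · rw [scanB_slash_nil]; simp [chainA, rep]
        by_cases h3 : t3 = 'h'
        · subst h3
          rcases t4 with _ | ⟨d, rest⟩
          · rw [scanB_close_nil]; simp [chainA, rep]
          by_cases hd : '1' ≤ d ∧ d ≤ '5'
          · have hr : rest.length ≤ n := by simp at hl ⊢; omega
            have IH' := IH rest hr
            simp only [chainA] at IH'
            rw [scanB_close_dig d rest hd]
            rcases dig_enum hd.1 hd.2 with rfl|rfl|rfl|rfl|rfl <;>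
              simp [chainA, rep_cons, rep_match, List.isPrefixOf,
                incB_1, incB_2, incB_3, incB_4, incB_5, IH']
          · have hr : (d :: rest).length ≤ n := by simp at hl ⊢; omega
            have IH' := IH _ hr
            simp only [chainA] at IH'
            obtain ⟨n1, n2, n3, n4, n5⟩ := not_dig hd
            rw [scanB_close_nondig d rest hd]
            have h0 : (d :: rest).head? = some '<' ∨ (d :: rest).head? = some d := Or.inr rfl
            have h1 := head?_rep ['<','h','5'] ['<','h','6'] rfl h0
            have h2 := head?_rep ['<','/','h','5'] ['<','/','h','6'] rfl h1
            have h3 := head?_rep ['<','h','4'] ['<','h','5'] rfl h2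
            have h4 := head?_rep ['<','/','h','4'] ['<','/','h','5'] rfl h3
            have h5 := head?_rep ['<','h','3'] ['<','h','4'] rfl h4
            have h6 := head?_rep ['<','/','h','3'] ['<','/','h','4'] rfl h5
            have h7 := head?_rep ['<','h','2'] ['<','h','3'] rfl h6
            have h8 := head?_rep ['<','/','h','2'] ['<','/','h','3'] rfl h7
            have h9 := head?_rep ['<','h','1'] ['<','h','2'] rfl h8
            have f5 := isP_false '5' [] h1 (by decide) n5
            have f4 := isP_false '4' [] h3 (by decide) n4
            have f3 := isP_false '3' [] h5 (by decide) n3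
            have f2 := isP_false '2' [] h7 (by decide) n2
            have f1 := isP_false '1' [] h9 (by decide) n1
            simp [chainA, rep_cons, List.isPrefixOf, f1, f2, f3, f4, f5, IH']
        · have hr : (t3 :: t4).length ≤ n := by simp at hl ⊢; omega
          have IH' := IH _ hr
          simp only [chainA] at IH'
          rw [scanB_slash_noth t3 t4 h3]
          have h0 : (t3 :: t4).head? = some '<' ∨ (t3 :: t4).head? = some t3 := Or.inr rfl
          have h1 := head?_rep ['<','h','5'] ['<','h','6'] rfl h0
          have h2 := head?_rep ['<','/','h','5'] ['<','/','h','6'] rfl h1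
          have h3' := head?_rep ['<','h','4'] ['<','h','5'] rfl h2
          have h4 := head?_rep ['<','/','h','4'] ['<','/','h','5'] rfl h3'
          have h5 := head?_rep ['<','h','3'] ['<','h','4'] rfl h4
          have h6 := head?_rep ['<','/','h','3'] ['<','/','h','4'] rfl h5
          have h7 := head?_rep ['<','h','2'] ['<','h','3'] rfl h6
          have h8 := head?_rep ['<','/','h','2'] ['<','/','h','3'] rfl h7
          have h9 := head?_rep ['<','h','1'] ['<','h','2'] rfl h8
          have hh : ¬ ('h' : Char) = t3 := fun e => h3 e.symm
          have f1 := isP_false 'h' ['5'] h0 (by decide) hh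
          have g5 := isP_false 'h' ['5'] h1 (by decide) hh
          have g4 := isP_false 'h' ['4'] h3' (by decide) hh
          have g3 := isP_false 'h' ['3'] h5 (by decide) hh
          have g2 := isP_false 'h' ['2'] h7 (by decide) hh
          have g1 := isP_false 'h' ['1'] h9 (by decide) hh
          have k5 := isP_false 'h' ['5'] h2 (by decide) hh
          have k4 := isP_false 'h' ['4'] h4 (by decide) hh
          have k3 := isP_false 'h' ['3'] h6 (by decide) hh
          have k2 := isP_false 'h' ['2'] h8 (by decide) hh
          simp [chainA, rep_cons, List.isPrefixOf, g1, g2, g3, g4, g5, IH']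
      · by_cases h1h : t1 = 'h'
        · subst h1h
          rcases t2 with _ | ⟨d, rest⟩
          · rw [scanB_open_nil]; simp [chainA, rep]
          by_cases hd : '1' ≤ d ∧ d ≤ '5'
          · have hr : rest.length ≤ n := by simp at hl ⊢; omega
            have IH' := IH rest hr
            simp only [chainA] at IH'
            rw [scanB_open_dig d rest hd]
            rcases dig_enum hd.1 hd.2 with rfl|rfl|rfl|rfl|rfl <;>
              simp [chainA, rep_cons, rep_match, List.isPrefixOf,
                incB_1, incB_2, incB_3, incB_4, incB_5, IH']
          · have hr : (d :: rest).length ≤ n := by simp at hl ⊢; omega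
            have IH' := IH _ hr
            simp only [chainA] at IH'
            obtain ⟨n1, n2, n3, n4, n5⟩ := not_dig hd
            rw [scanB_open_nondig d rest hd]
            have h0 : (d :: rest).head? = some '<' ∨ (d :: rest).head? = some d := Or.inr rfl
            have h1 := head?_rep ['<','h','5'] ['<','h','6'] rfl h0
            have h2 := head?_rep ['<','/','h','5'] ['<','/','h','6'] rfl h1
            have h3 := head?_rep ['<','h','4'] ['<','h','5'] rfl h2
            have h4 := head?_rep ['<','/','h','4'] ['<','/','h','5'] rfl h3
            have h5 := head?_rep ['<','h','3'] ['<','h','4'] rfl h4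
            have h6 := head?_rep ['<','/','h','3'] ['<','/','h','4'] rfl h5
            have h7 := head?_rep ['<','h','2'] ['<','h','3'] rfl h6
            have h8 := head?_rep ['<','/','h','2'] ['<','/','h','3'] rfl h7
            have f5 := isP_false '5' [] h0 (by decide) n5
            have f4 := isP_false '4' [] h2 (by decide) n4
            have f3 := isP_false '3' [] h4 (by decide) n3
            have f2 := isP_false '2' [] h6 (by decide) n2
            have f1 := isP_false '1' [] h8 (by decide) n1
            simp [chainA, rep_cons, List.isPrefixOf, n5, f1, f2, f3, f4, IH']
        · have hr : (t1 :: t2).length ≤ n := by simp at hl ⊢; omega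
          have IH' := IH _ hr
          simp only [chainA] at IH'
          rw [scanB_lt_other t1 t2 h1s h1h]
          have h0 : (t1 :: t2).head? = some '<' ∨ (t1 :: t2).head? = some t1 := Or.inr rfl
          have h1 := head?_rep ['<','h','5'] ['<','h','6'] rfl h0
          have h2 := head?_rep ['<','/','h','5'] ['<','/','h','6'] rfl h1
          have h3 := head?_rep ['<','h','4'] ['<','h','5'] rfl h2
          have h4 := head?_rep ['<','/','h','4'] ['<','/','h','5'] rfl h3
          have h5 := head?_rep ['<','h','3'] ['<','h','4'] rfl h4
          have h6 := head?_rep ['<','/','h','3'] ['<','/','h','4'] rfl h5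
          have h7 := head?_rep ['<','h','2'] ['<','h','3'] rfl h6
          have h8 := head?_rep ['<','/','h','2'] ['<','/','h','3'] rfl h7
          have h9 := head?_rep ['<','h','1'] ['<','h','2'] rfl h8
          have hsh : ¬ ('h' : Char) = t1 := fun e => h1h e.symm
          have hss : ¬ ('/' : Char) = t1 := fun e => h1s e.symm
          have f0h := isP_false 'h' ['5'] h0 (by decide) hsh
          have f0s := isP_false '/' ['h','5'] h0 (by decide) hss
          have g5 := isP_false '/' ['h','5'] h1 (by decide) hss
          have g4 := isP_false '/' ['h','4'] h3 (by decide) hss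
          have g3 := isP_false '/' ['h','3'] h5 (by decide) hss
          have g2 := isP_false '/' ['h','2'] h7 (by decide) hss
          have g1 := isP_false '/' ['h','1'] h9 (by decide) hss
          have k4 := isP_false 'h' ['4'] h2 (by decide) hsh
          have k3 := isP_false 'h' ['3'] h4 (by decide) hsh
          have k2 := isP_false 'h' ['2'] h6 (by decide) hsh
          have k1 := isP_false 'h' ['1'] h8 (by decide) hsh
          simp [chainA, rep_cons, List.isPrefixOf, hsh, g1, g2, g3, g4, g5,
            k1, k2, k3, k4, IH']

theorem ports_eq (text : String) : increaseHeadingLevel text = increaseHeadingLevel_alt text := by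
  unfold increaseHeadingLevel increaseHeadingLevel_alt
  by_cases hin : PySem.Str.isIn "<h2" text = true
  · rw [if_pos hin, hin]
    simp only [Bool.true_eq_false, if_false]
    rw [show (PySem.List.pyRange 1 6 1).reverse = [5, 4, 3, 2, 1] from by decide]
    simp only [List.foldl]
    have step : ∀ (s o nw : String), PySem.Str.replace s o nw =
        String.ofList (PySem.Chars.replace s.toList o.toList nw.toList) := fun _ _ _ => rfl
    simp only [step, String.toList_ofList]
    norm_num
    rw [replace_eq _ _ _ (by simp), replace_eq _ _ _ (by simp), replace_eq _ _ _ (by simp),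
        replace_eq _ _ _ (by simp), replace_eq _ _ _ (by simp), replace_eq _ _ _ (by simp),
        replace_eq _ _ _ (by simp), replace_eq _ _ _ (by simp), replace_eq _ _ _ (by simp),
        replace_eq _ _ _ (by simp)]
    have eo1 : ("<".toList ++ ("h".toList ++ PySem.Int.toChars 1)) = ['<','h','1'] := by decide
    have eo2 : ("<".toList ++ ("h".toList ++ PySem.Int.toChars 2)) = ['<','h','2'] := by decide
    have eo3 : ("<".toList ++ ("h".toList ++ PySem.Int.toChars 3)) = ['<','h','3'] := by decide
    have eo4 : ("<".toList ++ ("h".toList ++ PySem.Int.toChars 4)) = ['<','h','4'] := by decide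
    have eo5 : ("<".toList ++ ("h".toList ++ PySem.Int.toChars 5)) = ['<','h','5'] := by decide
    have eo6 : ("<".toList ++ ("h".toList ++ PySem.Int.toChars 6)) = ['<','h','6'] := by decide
    have ec1 : ("</".toList ++ ("h".toList ++ PySem.Int.toChars 1)) = ['<','/','h','1'] := by decide
    have ec2 : ("</".toList ++ ("h".toList ++ PySem.Int.toChars 2)) = ['<','/','h','2'] := by decide
    have ec3 : ("</".toList ++ ("h".toList ++ PySem.Int.toChars 3)) = ['<','/','h','3'] := by decide
    have ec4 : ("</".toList ++ ("h".toList ++ PySem.Int.toChars 4)) = ['<','/','h','4'] := by decide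
    have ec5 : ("</".toList ++ ("h".toList ++ PySem.Int.toChars 5)) = ['<','/','h','5'] := by decide
    have ec6 : ("</".toList ++ ("h".toList ++ PySem.Int.toChars 6)) = ['<','/','h','6'] := by decide
    simp only [eo1, eo2, eo3, eo4, eo5, eo6, ec1, ec2, ec3, ec4, ec5, ec6]
    have := main_eq (text.toList.length) text.toList le_rfl
    simp only [chainA] at this
    rw [this]
  · rw [if_neg hin]
    have hin' : PySem.Str.isIn "<h2" text = false := by simpa using hin
    rw [hin', if_pos rfl]

-- ===== VERDICT (by name: the statement is the Claim_ definition above) =====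
theorem increaseHeadingLevel_spec : Claim_equal_increaseHeadingLevel := by
  intro text _
  unfold Spec_increaseHeadingLevel
  exact ports_eq text
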